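-- pv_equiv track=rewrite | github.com/nkossally/leet_code | Python/maximum_product_of_first_and_last.py | maximumProduct
-- ===== SOURCE A (Python) =====
-- def maximumProduct(nums, m):
--     """
--     :type nums: List[int]
--     :type m: int
--     :rtype: int
--     """
--     result = float("-inf")
--
--     mins = []
--     maxes = []
--     curr_min = float("inf")
--     curr_max = float("-inf")
--     for i in range(len(nums) - 1, -1, -1):
--         curr_min = min(curr_min, nums[i])
--         curr_max = max(curr_max, nums[i])
--         mins.insert(0, curr_min)
--         maxes.insert(0, curr_max)
--
--     for i in range(0, len(nums) - m + 1):
--         j = i + m - 1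
--         prod = nums[i] * maxes[j]
--         result = max(result, prod)
--
--         j = i + m - 1
--         prod = nums[i] * mins[j]
--         result = max(result, prod)
--
--     return result
-- ===== SOURCE B (Python) =====
-- def maximumProduct(nums, m):
--     # One backward pass: maintain running min/max of the suffix nums[k:]
--     # and fold the best product on the fly (O(n) time, O(1) extra space).
--     cur_min = cur_max = nums[-1]
--     best = None
--     for k in range(len(nums) - 1, -1, -1):
--         x = nums[k]
--         if x < cur_min:
--             cur_min = x
--         if x > cur_max:
--             cur_max = x
--         if k >= m - 1:
--             y = nums[k - m + 1]
--             p = max(y * cur_max, y * cur_min)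
--             if best is None or p > best:
--                 best = p
--     return best
-- ===== Notes on version B (the rewrite author's own statement) =====
-- stated objective: faster
-- what changed: B replaces A's quadratic construction of suffix-min/max arrays via list.insert(0,...) plus a second window scan by a single backward pass that maintains the running suffix min/max in two scalars and folds the best product on the fly (no arrays at all).
-- outside the precondition, e.g. on maximumProduct([1, 2], 3): A returns -inf, B returns None; on maximumProduct([], 1): A returns -inf, B raises IndexError
import Mathlib
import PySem

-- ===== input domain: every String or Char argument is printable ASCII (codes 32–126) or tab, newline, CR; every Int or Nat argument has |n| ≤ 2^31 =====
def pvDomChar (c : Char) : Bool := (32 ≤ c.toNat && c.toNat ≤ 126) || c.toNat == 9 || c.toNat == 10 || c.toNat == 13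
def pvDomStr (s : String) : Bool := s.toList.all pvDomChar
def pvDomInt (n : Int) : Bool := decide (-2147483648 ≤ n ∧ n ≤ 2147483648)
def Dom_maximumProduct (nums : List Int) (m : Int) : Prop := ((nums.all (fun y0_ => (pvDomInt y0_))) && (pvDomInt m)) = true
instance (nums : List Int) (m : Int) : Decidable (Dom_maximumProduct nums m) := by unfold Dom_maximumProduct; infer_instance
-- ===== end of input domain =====

-- B replaces A's quadratic suffix-min/max arrays built with insert(0) by a single
-- backward pass keeping the running suffix min/max in two scalars and folding the
-- best product on the fly (objective: faster).

-- ===== PORT A =====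
-- result/curr_min/curr_max start as ±inf floats; ported as Option Int (none = the
-- relevant infinity), exact because they are only ever combined via min/max.
def stepA1 (nums : List Int)
    (st : Option Int × Option Int × List (Option Int) × List (Option Int)) (i : Int) :
    Option Int × Option Int × List (Option Int) × List (Option Int) :=
  let x := PySem.List.pyGetD nums i 0
  let cmin : Option Int := some (match st.1 with | none => x | some v => min v x)
  let cmax : Option Int := some (match st.2.1 with | none => x | some v => max v x)
  (cmin, cmax, PySem.List.insert st.2.2.1 0 cmin, PySem.List.insert st.2.2.2 0 cmax)

def stepA2 (nums : List Int) (m : Int) (mins maxes : List (Option Int))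
    (result : Option Int) (i : Int) : Option Int :=
  let j := i + m - 1
  let prod := PySem.List.pyGetD nums i 0 * (PySem.List.pyGetD maxes j none).getD 0
  let result : Option Int := some (match result with | none => prod | some r => max r prod)
  let prod2 := PySem.List.pyGetD nums i 0 * (PySem.List.pyGetD mins j none).getD 0
  some (match result with | none => prod2 | some r => max r prod2)

def maximumProduct (nums : List Int) (m : Int) : Int :=
  let n : Int := nums.length
  let st := (PySem.List.pyRange (n - 1) (-1) (-1)).foldl (stepA1 nums) (none, none, [], [])
  let result := (PySem.List.pyRange 0 (n - m + 1) 1).foldl (stepA2 nums m st.2.2.1 st.2.2.2) none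
  result.getD 0

-- ===== PORT B =====
-- best starts as None; ported as Option Int.
def stepB (nums : List Int) (m : Int) (st : Int × Int × Option Int) (k : Int) :
    Int × Int × Option Int :=
  let x := PySem.List.pyGetD nums k 0
  let cmin := if x < st.1 then x else st.1
  let cmax := if x > st.2.1 then x else st.2.1
  if m - 1 ≤ k then
    let y := PySem.List.pyGetD nums (k - m + 1) 0
    let p := max (y * cmax) (y * cmin)
    let best : Option Int := match st.2.2 with
      | none => some p
      | some b => some (if p > b then p else b)
    (cmin, cmax, best)
  else (cmin, cmax, st.2.2)

def maximumProduct_alt (nums : List Int) (m : Int) : Int :=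
  let last := PySem.List.pyGetD nums (-1) 0
  let st := (PySem.List.pyRange ((nums.length : Int) - 1) (-1) (-1)).foldl
    (stepB nums m) (last, last, none)
  (st.2.2).getD 0

-- ===== PRECONDITION & SPEC =====
-- Pre_ excludes inputs where A raises IndexError (m ≤ 0) and those where A returns
-- the float -inf, not an int (m > len(nums), i.e. no window exists).
def Pre_maximumProduct (nums : List Int) (m : Int) : Prop :=
  1 ≤ m ∧ m ≤ (nums.length : Int)
instance (nums : List Int) (m : Int) : Decidable (Pre_maximumProduct nums m) := by
  unfold Pre_maximumProduct; infer_instance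
def pvWitness_maximumProduct : List Int × Int := ([2, -3, 4], 2)
def Spec_maximumProduct (nums : List Int) (m : Int) (out : Int) : Prop := out = maximumProduct_alt nums m
instance (nums : List Int) (m : Int) (out : Int) : Decidable (Spec_maximumProduct nums m out) := by unfold Spec_maximumProduct; infer_instance

-- ===== CLAIM (what is proved, stated in full; the proofs are below) =====
def Claim_equal_maximumProduct : Prop := ∀ (nums : List Int) (m : Int), Dom_maximumProduct nums m → Pre_maximumProduct nums m → Spec_maximumProduct nums m (maximumProduct nums m)

-- ===== LEMMAS AND PROOFS =====

-- fold of a nonempty suffix as A's loop computes it (none = empty)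
def sfold (f : Int → Int → Int) (l : List Int) : Option Int :=
  l.foldr (fun x o => some (match o with | none => x | some v => f v x)) none

-- fold of a suffix with a seed value, as B's running scalars compute it
def rfold (f : Int → Int → Int) (z : Int) (l : List Int) : Int :=
  l.foldr (fun x v => f v x) z

-- Python's  acc = max(acc, x)  with acc possibly -inf
def F (r : Option Int) (x : Int) : Option Int :=
  some (match r with | none => x | some v => max v x)

-- the value B folds into best at index k (guard m-1 ≤ k already checked)
def pB (nums : List Int) (m : Int) (k : Int) : Int :=
  let y := PySem.List.pyGetD nums (k - m + 1) 0
  max (y * rfold max (PySem.List.pyGetD nums (-1) 0) (nums.drop k.toNat))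
      (y * rfold min (PySem.List.pyGetD nums (-1) 0) (nums.drop k.toNat))

-- B's best-update as a pure fold step over the index
def bestStep (nums : List Int) (m : Int) (r : Option Int) (k : Int) : Option Int :=
  if m - 1 ≤ k then F r (pB nums m k) else r

-- the value A folds into result for window start k (as a Nat)
def qq (nums : List Int) (mn : Nat) (k : Nat) : Int :=
  max (nums.getD k 0 * (sfold max (nums.drop (k + mn - 1))).getD 0)
      (nums.getD k 0 * (sfold min (nums.drop (k + mn - 1))).getD 0)

-- the descending index list [n-1, n-2, …, n-c]
def descIdx (n c : Nat) : List Int := (List.range c).map (fun k : Nat => (n : Int) - 1 - (k : Int))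

theorem sfold_cons (f : Int → Int → Int) (x : Int) (l : List Int) :
    sfold f (x :: l) = some (match sfold f l with | none => x | some v => f v x) := rfl

theorem rfold_cons (f : Int → Int → Int) (z x : Int) (l : List Int) :
    rfold f z (x :: l) = f (rfold f z l) x := rfl

theorem sfold_append_singleton (f : Int → Int → Int) (l : List Int) (z : Int) :
    sfold f (l ++ [z]) = some (rfold f z l) := by
  induction l with
  | nil => rfl
  | cons x l ih => simp [sfold_cons, ih, rfold_cons]

theorem rfold_append_singleton_self (f : Int → Int → Int) (z : Int) (l : List Int)
    (hf : f z z = z) : rfold f z (l ++ [z]) = rfold f z l := by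
  simp [rfold, List.foldr_append, hf]

theorem sfold_eq_rfold (f : Int → Int → Int) (l : List Int) (z d : Int)
    (hl : l ≠ []) (hz : z = l.getLast hl) (hf : f z z = z) :
    (sfold f l).getD d = rfold f z l := by
  conv_lhs => rw [← List.dropLast_append_getLast hl]
  conv_rhs => rw [← List.dropLast_append_getLast hl]
  rw [sfold_append_singleton, ← hz, rfold_append_singleton_self f z _ hf]
  rfl

theorem F_F (r : Option Int) (a b : Int) : F (F r a) b = F r (max a b) := by
  cases r <;> simp [F, max_assoc]

theorem foldl_F_swap (l : List Int) (r : Option Int) (x : Int) :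
    l.foldl F (F r x) = F (l.foldl F r) x := by
  induction l generalizing r with
  | nil => rfl
  | cons y l ih =>
    simp only [List.foldl_cons]
    rw [F_F, ← ih, F_F, max_comm y x]

theorem foldl_F_reverse (l : List Int) (r : Option Int) :
    l.reverse.foldl F r = l.foldl F r := by
  induction l generalizing r with
  | nil => rfl
  | cons y l ih => simp only [List.reverse_cons, List.foldl_append, List.foldl_cons,
      List.foldl_nil, ih, ← foldl_F_swap]

theorem foldl_id {α β : Type} (f : β → α → β) (b : β) (l : List α)
    (h : ∀ r x, x ∈ l → f r x = r) : l.foldl f b = b := by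
  induction l generalizing b with
  | nil => rfl
  | cons x l ih =>
    rw [List.foldl_cons, h b x (by simp), ih]
    intro r y hy; exact h r y (by simp [hy])

theorem map_range_reverse (f : Nat → Int) (K : Nat) :
    ((List.range K).map f).reverse = (List.range K).map (fun k => f (K - 1 - k)) := by
  apply List.ext_getElem
  · simp
  · intro i h1 h2
    simp only [List.getElem_reverse, List.getElem_map, List.getElem_range,
      List.length_map, List.length_range] at *

theorem descIdx_succ (n c : Nat) :
    descIdx n (c + 1) = descIdx n c ++ [(n : Int) - 1 - c] := by
  simp [descIdx, List.range_succ]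

theorem pyRange_eq_descIdx (n : Nat) :
    PySem.List.pyRange ((n : Int) - 1) (-1) (-1) = descIdx n n := by
  rw [PySem.List.pyRange_neg_one]
  have : ((n : Int) - 1 - (-1)).toNat = n := by omega
  rw [this]; rfl

theorem loop1_inv (nums : List Int) (c : Nat) (hc : c ≤ nums.length) :
    (descIdx nums.length c).foldl (stepA1 nums) (none, none, [], []) =
      (sfold min (nums.drop (nums.length - c)),
       sfold max (nums.drop (nums.length - c)),
       (List.range c).map (fun k => sfold min (nums.drop (nums.length - c + k))),
       (List.range c).map (fun k => sfold max (nums.drop (nums.length - c + k)))) := by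
  induction c with
  | zero => simp [descIdx, sfold]
  | succ c ih =>
    rw [descIdx_succ, List.foldl_append, ih (by omega)]
    set n := nums.length with hn
    set t := n - (c + 1) with ht
    have hnc : n - c = t + 1 := by omega
    have htlt : t < n := by omega
    have hidx : (n : Int) - 1 - c = (t : Int) := by omega
    have hx : PySem.List.pyGetD nums ((n : Int) - 1 - c) 0 = nums[t] := by
      rw [hidx, PySem.List.pyGetD_natCast, List.getD_eq_getElem _ _ htlt]
    have hdrop : nums.drop t = nums[t] :: nums.drop (t + 1) :=
      List.drop_eq_getElem_cons htlt
    simp only [List.foldl_cons, List.foldl_nil, stepA1, hx, hnc,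
      PySem.List.insert_zero]
    refine Prod.ext ?_ (Prod.ext ?_ (Prod.ext ?_ ?_)) <;>
      simp only [hdrop, sfold_cons]
    all_goals
      rw [List.range_succ_eq_map]
      simp only [List.map_cons, List.map_map, Nat.add_zero]
      congr 1
      · rw [hdrop, sfold_cons]
      · apply List.map_congr_left
        intro k _
        simp only [Function.comp]
        congr 2
        omega

theorem loop2B_inv (nums : List Int) (m : Int) (b₀ : Option Int) (c : Nat)
    (hc : c ≤ nums.length) :
    (descIdx nums.length c).foldl (stepB nums m)
        (PySem.List.pyGetD nums (-1) 0, PySem.List.pyGetD nums (-1) 0, b₀) =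
      (rfold min (PySem.List.pyGetD nums (-1) 0) (nums.drop (nums.length - c)),
       rfold max (PySem.List.pyGetD nums (-1) 0) (nums.drop (nums.length - c)),
       (descIdx nums.length c).foldl (bestStep nums m) b₀) := by
  induction c with
  | zero => simp [descIdx, rfold]
  | succ c ih =>
    rw [descIdx_succ, List.foldl_append, List.foldl_append, ih (by omega)]
    set n := nums.length with hn
    set t := n - (c + 1) with ht
    set L := PySem.List.pyGetD nums (-1) 0 with hL
    have hnc : n - c = t + 1 := by omega
    have htlt : t < n := by omega
    have hidx : (n : Int) - 1 - c = (t : Int) := by omega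
    have hx : PySem.List.pyGetD nums ((n : Int) - 1 - c) 0 = nums[t] := by
      rw [hidx, PySem.List.pyGetD_natCast, List.getD_eq_getElem _ _ htlt]
    have hdrop : nums.drop t = nums[t] :: nums.drop (t + 1) :=
      List.drop_eq_getElem_cons htlt
    have hmin : ∀ a b : Int, (if b < a then b else a) = min a b := by
      intro a b; rw [min_def]; split_ifs <;> omega
    have hmax : ∀ a b : Int, (if b > a then b else a) = max a b := by
      intro a b; rw [max_def]; split_ifs <;> omega
    simp only [List.foldl_cons, List.foldl_nil, hnc]
    simp only [stepB, bestStep, hx, hmin, hmax]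
    split_ifs with hg
    · refine Prod.ext ?_ (Prod.ext ?_ ?_)
      · simp only [hdrop, rfold_cons]
      · simp only [hdrop, rfold_cons]
      · cases hbb : List.foldl (bestStep nums m) b₀ (descIdx n c) with
        | none => simp only [F, pB, hidx, Int.toNat_natCast, hdrop, rfold_cons, ← hL]
        | some b => simp only [F, pB, hidx, Int.toNat_natCast, hdrop, rfold_cons, ← hL]
    · refine Prod.ext ?_ (Prod.ext ?_ rfl) <;> simp only [hdrop, rfold_cons]

theorem sfold_getD_eq_rfold (f : Int → Int → Int) (nums : List Int) (j : Nat)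
    (hj : j < nums.length) (hne : nums ≠ []) (hf : ∀ z : Int, f z z = z) (d : Int) :
    (sfold f (nums.drop j)).getD d = rfold f (PySem.List.pyGetD nums (-1) 0) (nums.drop j) := by
  have hl : nums.drop j ≠ [] := by rw [Ne, List.drop_eq_nil_iff]; omega
  rw [PySem.List.pyGetD_neg_one nums 0 hne]
  exact sfold_eq_rfold f (nums.drop j) _ d hl (List.getLast_drop hl).symm (hf _)

theorem pB_eq (nums : List Int) (mn : Nat) (k : Nat)
    (h1 : 1 ≤ mn) (h2 : mn ≤ nums.length) (hk : k < nums.length - mn + 1) :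
    pB nums (mn : Int) ((nums.length : Int) - 1 - (k : Int))
      = qq nums mn (nums.length - mn + 1 - 1 - k) := by
  have hne : nums ≠ [] := List.ne_nil_of_length_pos (by omega)
  have hidx : (nums.length : Int) - 1 - (k : Int) = ((nums.length - 1 - k : Nat) : Int) := by omega
  have hy : (((nums.length - 1 - k : Nat) : Int) - (mn : Int) + 1)
      = ((nums.length - mn - k : Nat) : Int) := by omega
  have hq : nums.length - mn + 1 - 1 - k = nums.length - mn - k := by omega
  have hq2 : nums.length - mn - k + mn - 1 = nums.length - 1 - k := by omega
  have hjn : nums.length - 1 - k < nums.length := by omega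
  simp only [pB, qq, hidx, hy, hq, hq2, Int.toNat_natCast, PySem.List.pyGetD_natCast]
  rw [sfold_getD_eq_rfold max nums _ hjn hne (fun z => max_self z) 0,
      sfold_getD_eq_rfold min nums _ hjn hne (fun z => min_self z) 0]

theorem maximumProduct_spec : Claim_equal_maximumProduct := by
  intro nums m hdom hpre
  unfold Spec_maximumProduct
  obtain ⟨hm1, hmn⟩ := hpre
  lift m to ℕ using (by omega : (0:Int) ≤ m) with mn
  have hmn1 : 1 ≤ mn := by exact_mod_cast hm1
  have hmnn : mn ≤ nums.length := by exact_mod_cast hmn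
  have hne : nums ≠ [] := List.ne_nil_of_length_pos (by omega)
  have hgetD : ∀ (f : Nat → Option Int) (i : Nat), i < nums.length →
      ((List.range nums.length).map f).getD i none = f i := by
    intro f i hi
    rw [List.getD_eq_getElem _ _ (by simpa using hi)]
    simp
  have hA : maximumProduct nums (mn : Int)
      = (((List.range (nums.length - mn + 1)).map (qq nums mn)).foldl F none).getD 0 := by
    simp only [maximumProduct]
    rw [pyRange_eq_descIdx nums.length, loop1_inv nums nums.length le_rfl]
    simp only [Nat.sub_self, Nat.zero_add]
    have hKint : (nums.length : Int) - (mn : Int) + 1 = ((nums.length - mn + 1 : Nat) : Int) := by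
      omega
    rw [hKint, PySem.List.pyRange_one]
    simp only [zero_add, Int.sub_zero, Int.toNat_natCast]
    rw [List.foldl_map]
    rw [PySem.List.foldl_congr_mem _ _
      (fun (r : Option Int) (k : Nat) => F r (qq nums mn k)) none ?_]
    · rw [← List.foldl_map (f := qq nums mn) (g := F)]
    · intro acc k hk
      have hkK : k < nums.length - mn + 1 := List.mem_range.mp hk
      have hji : (k : Int) + (mn : Int) - 1 = ((k + mn - 1 : Nat) : Int) := by omega
      have hjn : k + mn - 1 < nums.length := by omega
      simp only [stepA2, hji, PySem.List.pyGetD_natCast,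
        hgetD (fun t => sfold min (nums.drop t)) _ hjn,
        hgetD (fun t => sfold max (nums.drop t)) _ hjn,
        List.getD_eq_getElem nums _ (by omega : k < nums.length)]
      show F (F acc _) _ = _
      rw [F_F]
      simp only [qq, List.getD_eq_getElem nums _ (by omega : k < nums.length)]
  have hB : maximumProduct_alt nums (mn : Int)
      = (((List.range (nums.length - mn + 1)).map (qq nums mn)).foldl F none).getD 0 := by
    simp only [maximumProduct_alt]
    rw [pyRange_eq_descIdx nums.length, loop2B_inv nums (mn : Int) none nums.length le_rfl]
    have hsplit : List.range nums.length
        = List.range (nums.length - mn + 1)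
          ++ (List.range (mn - 1)).map (fun i => (nums.length - mn + 1) + i) := by
      rw [← List.range_add]; congr 1; omega
    simp only [descIdx]
    rw [hsplit, List.map_append, List.foldl_append, List.map_map]
    have hid : ∀ (r : Option Int),
        ((List.range (mn - 1)).map
          ((fun k : Nat => (nums.length : Int) - 1 - (k : Int)) ∘
            (fun i => (nums.length - mn + 1) + i))).foldl (bestStep nums (mn : Int)) r = r := by
      intro r
      apply foldl_id
      intro r' x hx
      simp only [List.mem_map, Function.comp] at hx
      obtain ⟨i, hi, rfl⟩ := hx
      have hi' : i < mn - 1 := List.mem_range.mp hi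
      simp only [bestStep, if_neg (by push_cast; omega :
        ¬ ((mn : Int) - 1 ≤ (nums.length : Int) - 1 - ((nums.length - mn + 1 + i : Nat) : Int)))]
    rw [hid]
    rw [List.foldl_map]
    rw [PySem.List.foldl_congr_mem _ _
      (fun (r : Option Int) (k : Nat) => F r (qq nums mn (nums.length - mn + 1 - 1 - k))) none ?_]
    · rw [← List.foldl_map (f := fun k => qq nums mn (nums.length - mn + 1 - 1 - k)) (g := F),
        ← map_range_reverse (qq nums mn) (nums.length - mn + 1), foldl_F_reverse]
    · intro acc k hk
      have hkK : k < nums.length - mn + 1 := List.mem_range.mp hk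
      simp only [bestStep, if_pos (by omega :
        (mn : Int) - 1 ≤ (nums.length : Int) - 1 - (k : Int))]
      rw [pB_eq nums mn k hmn1 hmnn hkK]
  rw [hA, hB]
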